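-- pv_equiv track=rewrite | github.com/wyk18703232953/myResearch | codeComplex/data/filteredData/python/quadratic/python_quadratic_0238.py | core_algorithm
-- ===== SOURCE A (Python) =====
-- from math import inf
--
-- def core_algorithm(n, s_list, c_list):
--     total_min = inf
--     for j in range(n):
--         min_i = inf
--         for i in range(0, j):
--             if s_list[i] < s_list[j]:
--                 if c_list[i] < min_i:
--                     min_i = c_list[i]
--
--         min_k = inf
--         for k in range(j + 1, n):
--             if s_list[k] > s_list[j]:
--                 if c_list[k] < min_k:
--                     min_k = c_list[k]
--
--         cost = min_i + c_list[j] + min_k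
--         if cost < total_min:
--             total_min = cost
--
--     if total_min != inf:
--         return total_min
--     else:
--         return -1
-- ===== SOURCE B (Python) =====
-- def core_algorithm(n, s_list, c_list):
--     # pair-DP: best increasing-pair cost ending at j, then extend by a third element
--     best2 = []
--     for j in range(n):
--         b = None
--         for i in range(j):
--             if s_list[i] < s_list[j]:
--                 t = c_list[i] + c_list[j]
--                 if b is None or t < b:
--                     b = t
--         best2.append(b)
--     ans = None
--     for k in range(n):
--         for j in range(k):
--             if s_list[j] < s_list[k] and best2[j] is not None:
--                 t = best2[j] + c_list[k]
--                 if ans is None or t < ans: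
--                     ans = t
--     return ans if ans is not None else -1
-- ===== Notes on version B (the rewrite author's own statement) =====
-- stated objective: alternative
-- what changed: B replaces A's per-middle-element prefix/suffix conditional minima with a two-phase pair DP: first a table of the cheapest increasing pair ending at each index, then a pass extending each pair by a third element.
import Mathlib
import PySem

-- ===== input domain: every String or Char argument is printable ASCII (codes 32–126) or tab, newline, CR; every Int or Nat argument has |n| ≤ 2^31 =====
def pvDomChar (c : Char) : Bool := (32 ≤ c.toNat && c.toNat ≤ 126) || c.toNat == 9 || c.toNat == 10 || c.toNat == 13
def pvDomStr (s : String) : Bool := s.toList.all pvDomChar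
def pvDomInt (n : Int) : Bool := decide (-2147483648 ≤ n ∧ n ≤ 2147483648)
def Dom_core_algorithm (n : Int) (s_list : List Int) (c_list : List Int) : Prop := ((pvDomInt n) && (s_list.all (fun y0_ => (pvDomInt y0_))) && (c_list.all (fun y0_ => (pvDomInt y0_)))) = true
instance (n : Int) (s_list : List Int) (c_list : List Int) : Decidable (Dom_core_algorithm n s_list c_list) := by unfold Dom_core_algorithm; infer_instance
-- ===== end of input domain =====

-- B replaces A's per-middle prefix/suffix conditional minima with a two-phase pair DP
-- (cheapest increasing pair ending at each index, then extended by a third element);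
-- same O(n^2) cost, different decomposition. Equivalence of the RETURN value is proved.

-- Python's float('inf') / None accumulators are modelled by Option Int (none = no value yet):
-- oLT is "x < m" with none acting as +infinity, oStep the conditional update, oAdd the
-- none-absorbing sum (inf + x = inf).
def oLT : Option Int → Option Int → Bool
  | none, _ => false
  | some _, none => true
  | some x, some y => decide (x < y)

def oStep (m x : Option Int) : Option Int := if oLT x m then x else m

def oAdd : Option Int → Option Int → Option Int
  | some a, some b => some (a + b)
  | _, _ => none

-- ===== PORT A =====
def core_algorithm (n : Int) (s_list : List Int) (c_list : List Int) : Int :=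
  let total_min := (PySem.List.pyRange 0 n 1).foldl (fun total_min j =>
    let min_i := (PySem.List.pyRange 0 j 1).foldl (fun m i =>
      if PySem.List.pyGetD s_list i 0 < PySem.List.pyGetD s_list j 0 then
        oStep m (some (PySem.List.pyGetD c_list i 0))
      else m) none
    let min_k := (PySem.List.pyRange (j + 1) n 1).foldl (fun m k =>
      if PySem.List.pyGetD s_list j 0 < PySem.List.pyGetD s_list k 0 then
        oStep m (some (PySem.List.pyGetD c_list k 0))
      else m) none
    let cost := oAdd (oAdd min_i (some (PySem.List.pyGetD c_list j 0))) min_k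
    oStep total_min cost) none
  match total_min with
  | some v => v
  | none => -1

-- ===== PORT B =====
def core_algorithm_alt (n : Int) (s_list : List Int) (c_list : List Int) : Int :=
  let best2 := (PySem.List.pyRange 0 n 1).foldl (fun best2 j =>
    let b := (PySem.List.pyRange 0 j 1).foldl (fun b i =>
      if PySem.List.pyGetD s_list i 0 < PySem.List.pyGetD s_list j 0 then
        oStep b (some (PySem.List.pyGetD c_list i 0 + PySem.List.pyGetD c_list j 0))
      else b) none
    best2 ++ [b]) ([] : List (Option Int))
  let ans := (PySem.List.pyRange 0 n 1).foldl (fun ans k =>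
    (PySem.List.pyRange 0 k 1).foldl (fun ans j =>
      if PySem.List.pyGetD s_list j 0 < PySem.List.pyGetD s_list k 0 then
        match PySem.List.pyGetD best2 j none with
        | some bj => oStep ans (some (bj + PySem.List.pyGetD c_list k 0))
        | none => ans
      else ans) ans) none
  match ans with
  | some v => v
  | none => -1

-- ===== PRECONDITION & SPEC =====
-- Exactly where Python A returns: s_list is indexed only when n ≥ 2, c_list only when n ≥ 1.
def Pre_core_algorithm (n : Int) (s_list : List Int) (c_list : List Int) : Prop :=
  (2 ≤ n → n ≤ (s_list.length : Int)) ∧ (1 ≤ n → n ≤ (c_list.length : Int))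
instance (n : Int) (s_list : List Int) (c_list : List Int) : Decidable (Pre_core_algorithm n s_list c_list) := by unfold Pre_core_algorithm; infer_instance

def pvWitness_core_algorithm : Int × List Int × List Int := (4, ([1, 3, 2, 4], [10, 2, 5, 7]))

def Spec_core_algorithm (n : Int) (s_list : List Int) (c_list : List Int) (out : Int) : Prop := out = core_algorithm_alt n s_list c_list
instance (n : Int) (s_list : List Int) (c_list : List Int) (out : Int) : Decidable (Spec_core_algorithm n s_list c_list out) := by unfold Spec_core_algorithm; infer_instance

-- ===== CLAIM (what is proved, stated in full; the proofs are below) =====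
def Claim_equal_core_algorithm : Prop := ∀ (n : Int) (s_list : List Int) (c_list : List Int), Dom_core_algorithm n s_list c_list → Pre_core_algorithm n s_list c_list → Spec_core_algorithm n s_list c_list (core_algorithm n s_list c_list)

-- ===== LEMMAS AND PROOFS =====

theorem oStep_none_right (m : Option Int) : oStep m none = m := rfl

theorem oStep_right_comm (m x y : Option Int) :
    oStep (oStep m x) y = oStep (oStep m y) x := by
  rcases m with _ | a <;> rcases x with _ | b <;> rcases y with _ | c <;>
    simp only [oStep, oLT] <;> split_ifs <;> simp_all <;> omega

theorem oStep_assoc (a b c : Option Int) :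
    oStep (oStep a b) c = oStep a (oStep b c) := by
  rcases a with _ | x <;> rcases b with _ | y <;> rcases c with _ | z <;>
    simp only [oStep, oLT] <;> split_ifs <;> simp_all <;> omega

theorem oAdd_oStep (x m y : Option Int) :
    oAdd x (oStep m y) = oStep (oAdd x m) (oAdd x y) := by
  rcases x with _ | a <;> rcases m with _ | b <;> rcases y with _ | c <;>
    simp only [oStep, oLT, oAdd] <;> split_ifs <;> simp_all <;> omega


theorem foldl_oStep_hoist (l : List (Option Int)) : ∀ (acc b : Option Int),
    l.foldl oStep (oStep acc b) = oStep acc (l.foldl oStep b) := by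
  induction l with
  | nil => intro acc b; rfl
  | cons x t ih =>
    intro acc b
    simp only [List.foldl_cons]
    rw [oStep_assoc, ih]

theorem foldl_oStep_acc (l : List (Option Int)) (acc : Option Int) :
    l.foldl oStep acc = oStep acc (l.foldl oStep none) := by
  have := foldl_oStep_hoist l acc none
  simpa [oStep_none_right] using this

theorem oAdd_foldl (x : Option Int) (q : Int → Prop) [DecidablePred q] (v : Int → Int) :
    ∀ (l : List Int) (acc : Option Int),
    oAdd x (l.foldl (fun m k => if q k then oStep m (some (v k)) else m) acc)
    = l.foldl (fun m k => oStep m (if q k then oAdd x (some (v k)) else none)) (oAdd x acc) := by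
  intro l
  induction l with
  | nil => intro acc; rfl
  | cons a t ih =>
    intro acc
    simp only [List.foldl_cons]
    by_cases hq : q a
    · simp only [hq, if_pos]
      rw [ih, oAdd_oStep]
    · simp only [hq, if_neg, not_false_iff, oStep_none_right]
      exact ih acc

theorem oStep_oAdd_right (m : Option Int) (a u : Int) :
    oStep (oAdd m (some a)) (some (u + a)) = oAdd (oStep m (some u)) (some a) := by
  rcases m with _ | b <;> simp only [oStep, oLT, oAdd] <;> split_ifs <;> simp_all <;> omega

theorem foldl_add_const (a : Int) (q : Int → Prop) [DecidablePred q] (v : Int → Int) :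
    ∀ (l : List Int) (acc : Option Int),
    l.foldl (fun m i => if q i then oStep m (some (v i + a)) else m) (oAdd acc (some a))
    = oAdd (l.foldl (fun m i => if q i then oStep m (some (v i)) else m) acc) (some a) := by
  intro l
  induction l with
  | nil => intro acc; rfl
  | cons b t ih =>
    intro acc
    simp only [List.foldl_cons]
    by_cases hq : q b
    · simp only [hq, if_pos]
      rw [oStep_oAdd_right, ih]
    · simp only [hq, if_neg, not_false_iff]
      exact ih acc

theorem foldl_nest_A (h : Int → List (Option Int)) :
    ∀ (Js : List Int) (acc : Option Int),
    Js.foldl (fun tm j => oStep tm ((h j).foldl oStep none)) acc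
    = (Js.flatMap h).foldl oStep acc := by
  intro Js
  induction Js with
  | nil => intro acc; rfl
  | cons j t ih =>
    intro acc
    simp only [List.foldl_cons, List.flatMap_cons, List.foldl_append]
    rw [← foldl_oStep_acc, ih]

theorem foldl_nest_B (h : Int → List (Option Int)) :
    ∀ (Js : List Int) (acc : Option Int),
    Js.foldl (fun a k => (h k).foldl oStep a) acc
    = (Js.flatMap h).foldl oStep acc := by
  intro Js
  induction Js with
  | nil => intro acc; rfl
  | cons j t ih =>
    intro acc
    simp only [List.foldl_cons, List.flatMap_cons, List.foldl_append]
    exact ih _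

theorem flatMap_split_last {α : Type} (f : Int → List α) (g1 : Int → α) :
    ∀ (l : List Int), (l.flatMap fun j => f j ++ [g1 j]).Perm (l.flatMap f ++ l.map g1) := by
  intro l
  induction l with
  | nil => simp
  | cons a t ih =>
    simp only [List.flatMap_cons, List.map_cons]
    refine (List.Perm.append_left _ ih).trans ?_
    rw [List.append_assoc, List.append_assoc]
    simp only [List.singleton_append]
    exact List.Perm.append_left _ List.perm_middle.symm

theorem tri_perm {α : Type} (g : Int → Int → α) : ∀ (N : Nat),
    ((PySem.List.pyRange 0 (N : Int) 1).flatMap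
      (fun j => (PySem.List.pyRange (j + 1) (N : Int) 1).map (fun k => g j k))).Perm
    ((PySem.List.pyRange 0 (N : Int) 1).flatMap
      (fun k => (PySem.List.pyRange 0 k 1).map (fun j => g j k))) := by
  intro N
  induction N with
  | zero =>
    rw [PySem.List.pyRange_one_eq_nil (by omega)]
    simp
  | succ N ih =>
    have h0 : (0 : Int) ≤ (N : Int) := by omega
    push_cast
    rw [PySem.List.pyRange_one_succ_right h0, List.flatMap_append, List.flatMap_append]
    have hlast : (([(N : Int)]).flatMap
        (fun j => (PySem.List.pyRange (j + 1) ((N : Int) + 1) 1).map (fun k => g j k))) = [] := by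
      simp [PySem.List.pyRange_one_eq_nil (by omega : ((N : Int) + 1) ≤ (N : Int) + 1)]
    have hmain : ((PySem.List.pyRange 0 (N : Int) 1).flatMap
        (fun j => (PySem.List.pyRange (j + 1) ((N : Int) + 1) 1).map (fun k => g j k)))
        = ((PySem.List.pyRange 0 (N : Int) 1).flatMap
        (fun j => (PySem.List.pyRange (j + 1) (N : Int) 1).map (fun k => g j k) ++ [g j (N : Int)])) := by
      refine List.flatMap_congr ?_
      intro j hj
      rw [PySem.List.mem_pyRange_one] at hj
      rw [PySem.List.pyRange_one_succ_right (by omega), List.map_append]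
      rfl
    rw [hlast, hmain, List.append_nil]
    refine ((flatMap_split_last _ _ _).trans ?_)
    have hrlast : (([(N : Int)]).flatMap
        (fun k => (PySem.List.pyRange 0 k 1).map (fun j => g j k)))
        = (PySem.List.pyRange 0 (N : Int) 1).map (fun j => g j (N : Int)) := by
      simp
    rw [hrlast]
    exact List.Perm.append ih (List.Perm.refl _)

theorem tri_perm_int {α : Type} (g : Int → Int → α) (n : Int) :
    ((PySem.List.pyRange 0 n 1).flatMap
      (fun j => (PySem.List.pyRange (j + 1) n 1).map (fun k => g j k))).Perm
    ((PySem.List.pyRange 0 n 1).flatMap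
      (fun k => (PySem.List.pyRange 0 k 1).map (fun j => g j k))) := by
  by_cases hn : n ≤ 0
  · rw [PySem.List.pyRange_one_eq_nil hn]
    simp
  · have : n = ((n.toNat : Nat) : Int) := by omega
    rw [this]
    exact tri_perm g n.toNat


-- proof-side abbreviations for the shared quantities
def pvS (s : List Int) (i : Int) : Int := PySem.List.pyGetD s i 0

def pvMinA (s c : List Int) (j : Int) : Option Int :=
  (PySem.List.pyRange 0 j 1).foldl
    (fun m i => if pvS s i < pvS s j then oStep m (some (pvS c i)) else m) none

def pvB2 (s c : List Int) (j : Int) : Option Int := oAdd (pvMinA s c j) (some (pvS c j))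

def pvG (s c : List Int) (j k : Int) : Option Int :=
  if pvS s j < pvS s k then oAdd (pvB2 s c j) (some (pvS c k)) else none

def pvPA (n : Int) (s c : List Int) : List (Option Int) :=
  (PySem.List.pyRange 0 n 1).flatMap
    (fun j => (PySem.List.pyRange (j + 1) n 1).map (fun k => pvG s c j k))

def pvPB (n : Int) (s c : List Int) : List (Option Int) :=
  (PySem.List.pyRange 0 n 1).flatMap
    (fun k => (PySem.List.pyRange 0 k 1).map (fun j => pvG s c j k))

theorem oAdd_none_right (x : Option Int) : oAdd x none = none := by cases x <;> rfl

theorem oAdd_none_left (x : Option Int) : oAdd none x = none := rfl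

theorem oStep_match (o : Option Int) (ans : Option Int) (w : Int) :
    (match o with | some bj => oStep ans (some (bj + w)) | none => ans)
    = oStep ans (oAdd o (some w)) := by
  cases o <;> rfl

theorem if_oStep (p : Prop) [Decidable p] (ans x : Option Int) :
    (if p then oStep ans x else ans) = oStep ans (if p then x else none) := by
  split <;> rfl

theorem A_char (n : Int) (s c : List Int) :
    core_algorithm n s c
    = (match (pvPA n s c).foldl oStep none with | some v => v | none => -1) := by
  unfold core_algorithm
  have hbody : (fun (total_min : Option Int) (j : Int) =>
      oStep total_min (oAdd (oAdd ((PySem.List.pyRange 0 j 1).foldl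
          (fun m i => if PySem.List.pyGetD s i 0 < PySem.List.pyGetD s j 0 then
            oStep m (some (PySem.List.pyGetD c i 0)) else m) none)
          (some (PySem.List.pyGetD c j 0)))
        ((PySem.List.pyRange (j + 1) n 1).foldl
          (fun m k => if PySem.List.pyGetD s j 0 < PySem.List.pyGetD s k 0 then
            oStep m (some (PySem.List.pyGetD c k 0)) else m) none)))
      = (fun (total_min : Option Int) (j : Int) =>
        oStep total_min
          (((PySem.List.pyRange (j + 1) n 1).map (fun k => pvG s c j k)).foldl oStep none)) := by
    funext total j
    have h1 := oAdd_foldl (oAdd (pvMinA s c j) (some (pvS c j)))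
      (fun k => pvS s j < pvS s k) (pvS c) (PySem.List.pyRange (j + 1) n 1) none
    simp only [pvS, pvMinA, pvB2, pvG] at h1 ⊢
    rw [oAdd_none_right] at h1
    rw [h1, List.foldl_map]
  rw [hbody]
  rw [foldl_nest_A (fun j => (PySem.List.pyRange (j + 1) n 1).map (fun k => pvG s c j k))
    (PySem.List.pyRange 0 n 1) none]
  rfl

theorem B_char (n : Int) (s c : List Int) :
    core_algorithm_alt n s c
    = (match (pvPB n s c).foldl oStep none with | some v => v | none => -1) := by
  unfold core_algorithm_alt
  simp only [PySem.List.foldl_append_singleton_eq_map, List.nil_append]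
  have h2 : ∀ j : Int,
      (PySem.List.pyRange 0 j 1).foldl
        (fun b i => if PySem.List.pyGetD s i 0 < PySem.List.pyGetD s j 0 then
          oStep b (some (PySem.List.pyGetD c i 0 + PySem.List.pyGetD c j 0)) else b) none
      = pvB2 s c j := by
    intro j
    have h := foldl_add_const (pvS c j) (fun i => pvS s i < pvS s j) (pvS c)
      (PySem.List.pyRange 0 j 1) none
    rw [oAdd_none_left] at h
    simp only [pvS] at h
    rw [h]
    rfl
  rw [PySem.List.foldl_congr_mem _ _
    (fun ans k => ((PySem.List.pyRange 0 k 1).map (fun j => pvG s c j k)).foldl oStep ans) _ ?_]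
  · rw [foldl_nest_B (fun k => (PySem.List.pyRange 0 k 1).map (fun j => pvG s c j k))
      (PySem.List.pyRange 0 n 1) none]
    rfl
  · intro ans k hk
    rw [PySem.List.mem_pyRange_one] at hk
    rw [PySem.List.foldl_congr_mem _ _ (fun ans j => oStep ans (pvG s c j k)) _ ?_]
    · simp only [List.foldl_map]
    · intro a j hj
      rw [PySem.List.mem_pyRange_one] at hj
      rw [PySem.List.pyGetD_map_pyRange_of_nonneg _ _ _ _ (by omega) (by omega), h2 j,
        oStep_match, if_oStep]
      rfl

-- ===== VERDICT (by name: the statement is the Claim_ definition above) =====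
theorem ports_eq (n : Int) (s c : List Int) :
    core_algorithm n s c = core_algorithm_alt n s c := by
  rw [A_char, B_char]
  unfold pvPA pvPB
  rw [List.Perm.foldl_eq (rcomm := ⟨oStep_right_comm⟩) (tri_perm_int (pvG s c) n)]

theorem core_algorithm_spec : Claim_equal_core_algorithm := by
  intro n s c _ _
  unfold Spec_core_algorithm
  exact ports_eq n s c
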